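-- pv_equiv track=rewrite | github.com/unaguna/mass-git | massgit/_main/subcmd/_grep.py | summarize_exit_code
-- ===== SOURCE A (Python) =====
-- import typing as t
--
-- def summarize_exit_code(exit_codes: t.Iterable[int]) -> int:
--     exit_codes_list = list(exit_codes)
--     exit_codes_err = [c for c in exit_codes_list if c not in (0, 1)]
--
--     if len(exit_codes_err) > 0:
--         return max(exit_codes_err)
--     elif 0 in exit_codes_list:
--         return 0
--     else:
--         return 1
-- ===== SOURCE B (Python) =====
-- import typing as t
--
-- def summarize_exit_code(exit_codes: t.Iterable[int]) -> int:
--     # Encode each code as a lexicographic severity key; the answer is the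
--     # second component of the greatest key (default key = key of "no codes").
--     def rank(c: int) -> t.Tuple[int, int]:
--         if c == 1:
--             return (0, 1)
--         if c == 0:
--             return (1, 0)
--         return (2, c)
--     return max(map(rank, exit_codes), default=(0, 1))[1]
-- ===== Notes on version B (the rewrite author's own statement) =====
-- stated objective: alternative
-- what changed: Instead of filtering out an error list, taking its max and testing membership of zero, B encodes every code as a lexicographic severity key (error codes get the top rank keyed by their value, zero a middle rank, one the bottom rank) and returns the value component of the single greatest key, the empty-input default key yielding one.
import Mathlib
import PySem

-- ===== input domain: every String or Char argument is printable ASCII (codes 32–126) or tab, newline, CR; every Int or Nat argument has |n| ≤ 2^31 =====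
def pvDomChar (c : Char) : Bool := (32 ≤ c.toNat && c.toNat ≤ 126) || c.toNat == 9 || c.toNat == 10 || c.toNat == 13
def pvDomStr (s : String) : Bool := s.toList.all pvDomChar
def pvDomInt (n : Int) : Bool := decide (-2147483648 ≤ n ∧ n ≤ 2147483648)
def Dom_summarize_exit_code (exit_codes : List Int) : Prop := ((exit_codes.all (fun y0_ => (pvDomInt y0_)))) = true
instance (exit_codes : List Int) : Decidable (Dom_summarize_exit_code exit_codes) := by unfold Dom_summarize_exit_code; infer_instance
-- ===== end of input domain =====

-- B replaces A's filter / max / membership pipeline by mapping each code to a lexicographic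
-- severity key and taking one max over the keys (objective: alternative).

-- ===== PORT A =====
def summarize_exit_code (exit_codes : List Int) : Int :=
  let exit_codes_list := exit_codes
  let exit_codes_err := exit_codes_list.filter (fun c => !(c == 0 || c == 1))
  if exit_codes_err.length > 0 then
    -- Python max(nonempty int list): left fold of binary max
    match exit_codes_err with
    | [] => 0  -- unreachable under the guard
    | h :: t => t.foldl max h
  else if 0 ∈ exit_codes_list then 0
  else 1

-- ===== PORT B =====
-- rank(c) from Source B
def pvRank (c : Int) : Int × Int :=
  if c = 1 then (0, 1) else if c = 0 then (1, 0) else (2, c)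

-- Python max(a, b) on int pairs: b iff strictly lexicographically greater (first maximal wins)
def pvLmax (a b : Int × Int) : Int × Int :=
  if a.1 < b.1 ∨ (a.1 = b.1 ∧ a.2 < b.2) then b else a

def summarize_exit_code_alt (exit_codes : List Int) : Int :=
  (match exit_codes.map pvRank with
   | [] => (0, 1)            -- max(..., default=(0,1)) on an empty iterable
   | h :: t => t.foldl pvLmax h).2

-- ===== PRECONDITION & SPEC =====
def Spec_summarize_exit_code (exit_codes : List Int) (out : Int) : Prop := out = summarize_exit_code_alt exit_codes
instance (exit_codes : List Int) (out : Int) : Decidable (Spec_summarize_exit_code exit_codes out) := by unfold Spec_summarize_exit_code; infer_instance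

-- ===== CLAIM (what is proved, stated in full; the proofs are below) =====
def Claim_equal_summarize_exit_code : Prop := ∀ (exit_codes : List Int), Dom_summarize_exit_code exit_codes → Spec_summarize_exit_code exit_codes (summarize_exit_code exit_codes)

-- ===== LEMMAS AND PROOFS =====

-- max of a nonempty list, A-style
def pvPmax : List Int → Int
  | [] => 0
  | h :: t => t.foldl max h

-- accumulators that can occur in B's fold are ≥ (0,1) lexicographically
def pvGe01 (a : Int × Int) : Prop := 0 < a.1 ∨ (a.1 = 0 ∧ 1 ≤ a.2)

theorem pvLmax_id01 (a : Int × Int) (h : pvGe01 a) : pvLmax a (0, 1) = a := by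
  obtain ⟨x, y⟩ := a
  simp only [pvLmax, pvGe01] at *
  split_ifs with h1 <;> simp_all [Prod.mk.injEq] <;> omega

theorem pvGe01_lmax (a b : Int × Int) (ha : pvGe01 a) (hb : pvGe01 b) : pvGe01 (pvLmax a b) := by
  obtain ⟨x, y⟩ := a; obtain ⟨u, v⟩ := b
  simp only [pvLmax, pvGe01] at *
  split_ifs <;> simp_all

theorem pvLmax_10_10 (a : Int × Int) : pvLmax (pvLmax a (1, 0)) (1, 0) = pvLmax a (1, 0) := by
  obtain ⟨x, y⟩ := a
  simp only [pvLmax]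
  split_ifs <;> simp_all [Prod.mk.injEq] <;> omega

theorem pvLmax_10_2 (a : Int × Int) (m : Int) :
    pvLmax (pvLmax a (1, 0)) (2, m) = pvLmax a (2, m) := by
  obtain ⟨x, y⟩ := a
  simp only [pvLmax]
  split_ifs <;> simp_all [Prod.mk.injEq] <;> omega

theorem pvLmax_2_10 (a : Int × Int) (c : Int) :
    pvLmax (pvLmax a (2, c)) (1, 0) = pvLmax a (2, c) := by
  obtain ⟨x, y⟩ := a
  simp only [pvLmax]
  split_ifs <;> simp_all [Prod.mk.injEq] <;> omega

theorem pvLmax_2_2 (a : Int × Int) (c m : Int) :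
    pvLmax (pvLmax a (2, c)) (2, m) = pvLmax a (2, max c m) := by
  obtain ⟨x, y⟩ := a
  simp only [pvLmax]
  split_ifs <;> simp_all [Prod.mk.injEq] <;> omega

theorem pv_foldl_max_max (l : List Int) : ∀ c h : Int, l.foldl max (max c h) = max c (l.foldl max h) := by
  induction l with
  | nil => intro c h; rfl
  | cons b t ih => intro c h; simp only [List.foldl_cons, max_assoc, ih]

-- characterization of B's fold in terms of A's ingredients
theorem pv_fold (l : List Int) : ∀ a : Int × Int, pvGe01 a →
    (l.map pvRank).foldl pvLmax a =
      if l.filter (fun c => !(c == 0 || c == 1)) = [] then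
        (if 0 ∈ l then pvLmax a (1, 0) else a)
      else pvLmax a (2, pvPmax (l.filter (fun c => !(c == 0 || c == 1)))) := by
  induction l with
  | nil => intro a _; simp
  | cons c t ih =>
    intro a ha
    by_cases h1 : c = 1
    · subst h1
      have : pvRank 1 = (0, 1) := by decide
      simp only [List.map_cons, List.foldl_cons, this, pvLmax_id01 a ha, List.filter_cons,
        List.mem_cons]
      rw [ih a ha]
      simp
    · by_cases h0 : c = 0
      · subst h0
        have hge : pvGe01 (pvLmax a (1, 0)) := pvGe01_lmax a (1, 0) ha (by simp [pvGe01])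
        have hr0 : pvRank 0 = (1, 0) := by decide
        simp only [List.map_cons, List.foldl_cons, hr0]
        rw [ih (pvLmax a (1, 0)) hge,
          show List.filter (fun c => !(c == 0 || c == 1)) (0 :: t)
              = List.filter (fun c => !(c == 0 || c == 1)) t from by simp,
          if_pos (by simp : (0:Int) ∈ 0 :: t)]
        cases hft : t.filter (fun c => !(c == 0 || c == 1)) with
        | nil => by_cases h0t : 0 ∈ t <;> simp [h0t, pvLmax_10_10]
        | cons h t' => simp [pvLmax_10_2]
      · -- error code
        have hr : pvRank c = (2, c) := by simp [pvRank, h1, h0]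
        have hge : pvGe01 (pvLmax a (2, c)) := pvGe01_lmax a (2, c) ha (by simp [pvGe01])
        have hpf : (fun c => !(c == 0 || c == 1)) c = true := by simp [h0, h1]
        simp only [List.map_cons, List.foldl_cons, hr, List.filter_cons, hpf, if_pos]
        rw [ih (pvLmax a (2, c)) hge]
        cases hft : t.filter (fun c => !(c == 0 || c == 1)) with
        | nil =>
          rw [hft] at *
          simp only [if_pos rfl, if_neg (by simp : ¬(c :: ([]:List Int) = []))]
          split_ifs with h0t <;> simp [pvLmax_2_10, pvPmax]
        | cons h t' =>
          rw [hft] at *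
          simp only [if_neg (by simp : ¬(h :: t' = [])),
            if_neg (by simp : ¬(c :: h :: t' = []))]
          rw [pvLmax_2_2]
          simp [pvPmax, pv_foldl_max_max]

-- ===== VERDICT (by name: the statement is the Claim_ definition above) =====
theorem summarize_exit_code_spec : Claim_equal_summarize_exit_code := by
  intro exit_codes _
  unfold Spec_summarize_exit_code summarize_exit_code summarize_exit_code_alt
  cases exit_codes with
  | nil => rfl
  | cons c t =>
    have hge : pvGe01 (pvRank c) := by
      by_cases h1 : c = 1
      · subst h1; simp [pvRank, pvGe01]
      · by_cases h0 : c = 0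
        · subst h0; simp [pvRank, pvGe01]
        · simp [pvRank, pvGe01, h1, h0]
    simp only [List.map_cons, List.foldl_cons]
    rw [pv_fold t (pvRank c) hge]
    by_cases h1 : c = 1
    · subst h1
      rw [show pvRank 1 = (0, 1) from by decide,
        show List.filter (fun c => !(c == 0 || c == 1)) (1 :: t)
            = List.filter (fun c => !(c == 0 || c == 1)) t from by simp]
      cases hft : t.filter (fun c => !(c == 0 || c == 1)) with
      | nil => by_cases h0t : 0 ∈ t <;> simp [h0t, pvLmax]
      | cons h t' => simp [pvLmax, pvPmax]
    · by_cases h0 : c = 0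
      · subst h0
        rw [show pvRank 0 = (1, 0) from by decide,
          show List.filter (fun c => !(c == 0 || c == 1)) (0 :: t)
              = List.filter (fun c => !(c == 0 || c == 1)) t from by simp]
        cases hft : t.filter (fun c => !(c == 0 || c == 1)) with
        | nil => by_cases h0t : 0 ∈ t <;> simp [h0t, pvLmax]
        | cons h t' => simp [pvLmax, pvPmax]
      · rw [show pvRank c = (2, c) from by simp [pvRank, h1, h0],
          show List.filter (fun c => !(c == 0 || c == 1)) (c :: t)
              = c :: List.filter (fun c => !(c == 0 || c == 1)) t from by
            simp [List.filter_cons, h0, h1]]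
        cases hft : t.filter (fun c => !(c == 0 || c == 1)) with
        | nil => by_cases h0t : 0 ∈ t <;> simp [h0t, pvLmax, pvPmax]
        | cons h t' =>
          have hA : (h :: t').foldl max c = max c (t'.foldl max h) := by
            simp only [List.foldl_cons]
            exact pv_foldl_max_max t' c h
          simp only [List.length_cons, pvPmax, hA, pvLmax,
            if_pos (by omega : (0:Nat) < t'.length + 1 + 1),
            if_neg (by simp : ¬(h :: t' = []))]
          split_ifs with hc <;> simp at hc ⊢ <;> omega
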